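-- pv_equiv track=rewrite | github.com/gracieux-dev/AMAZING | src/output_writer.py | validate_hex_format
-- ===== SOURCE A (Python) =====
-- def validate_hex_format(content: str) -> bool:
--     """
--     Valide le format hexadécimal du contenu
--
--     Args:
--         content: Contenu à valider
--
--     Returns:
--         True si le format est valide
--     """
--     lines = content.strip().split('\n')
--     if not lines:
--         return False
--
--     # Vérifier que toutes les lignes ont la même longueur
--     first_line_len = len(lines[0])
--     for line in lines:
--         if len(line) != first_line_len:
--             return False
--
--         # Vérifier que tous les caractères sont hexadécimaux
--         for char in line:
--             if char not in '0123456789ABCDEF':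
--                 return False
--
--     return True
-- ===== SOURCE B (Python) =====
-- def validate_hex_format(content: str) -> bool:
--     # Single flat pass: no line splitting. The first newline position w fixes the
--     # line width; newlines must then sit exactly at positions i with i % (w+1) == w,
--     # the total length must be a multiple of w+1 minus one, and every other
--     # character must be a hex digit.
--     s = content.strip()
--     w = s.find('\n')
--     if w == -1:
--         w = len(s)
--     if (len(s) + 1) % (w + 1) != 0:
--         return False
--     return all(c == '\n' if i % (w + 1) == w else c in '0123456789ABCDEF'
--                for i, c in enumerate(s))
-- ===== Notes on version B (the rewrite author's own statement) =====
-- stated objective: alternative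
-- what changed: Replaces splitting into lines and the nested per-line/per-char scan by a single flat pass over the stripped string using modular arithmetic: the first newline position fixes the width w, the length must be a multiple of w+1 minus one, newlines must sit exactly at positions congruent to w mod w+1, and all other characters must be hex digits.
import Mathlib
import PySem

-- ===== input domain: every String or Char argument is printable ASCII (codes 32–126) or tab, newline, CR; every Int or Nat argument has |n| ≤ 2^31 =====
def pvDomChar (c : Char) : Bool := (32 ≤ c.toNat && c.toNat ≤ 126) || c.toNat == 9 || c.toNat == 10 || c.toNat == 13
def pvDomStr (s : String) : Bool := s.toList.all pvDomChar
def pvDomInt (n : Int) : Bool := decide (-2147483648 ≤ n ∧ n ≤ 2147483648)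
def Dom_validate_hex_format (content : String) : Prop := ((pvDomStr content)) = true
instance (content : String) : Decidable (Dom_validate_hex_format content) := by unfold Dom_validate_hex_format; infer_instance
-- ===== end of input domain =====

-- B replaces A's split-into-lines + nested per-line scan by a single flat pass over the
-- stripped string with modular arithmetic on newline positions (alternative, same cost).

-- ===== PORT A =====
-- the hex alphabet '0123456789ABCDEF'; 'char not in <str>' for a 1-char char is list membership
def pvHexChars : List Char := ['0','1','2','3','4','5','6','7','8','9','A','B','C','D','E','F']

-- A's outer loop: per line, first the length check, then the per-char loop (early exit = List.all)
def pvALoop (lines : List (List Char)) (firstLen : Nat) : Bool :=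
  match lines with
  | [] => true
  | line :: rest =>
    if line.length ≠ firstLen then false
    else if line.all (fun c => pvHexChars.contains c) then pvALoop rest firstLen
    else false

def validate_hex_format (content : String) : Bool :=
  let lines := PySem.Chars.splitOn (PySem.Chars.strip content.toList) ['\n']
  match lines with
  | [] => false                              -- 'if not lines: return False'
  | l0 :: rest => pvALoop (l0 :: rest) l0.length

-- ===== PORT B =====
def validate_hex_format_alt (content : String) : Bool :=
  let s := PySem.Chars.strip content.toList
  let w0 := PySem.Chars.find s ['\n']                    -- w = s.find('\n')
  let w : Int := if w0 == -1 then (s.length : Int) else w0   -- if w == -1: w = len(s)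
  if PySem.Int.mod ((s.length : Int) + 1) (w + 1) ≠ 0 then false
  else (PySem.List.enumerate s).all
    (fun p => if PySem.Int.mod p.1 (w + 1) == w then p.2 == '\n'
              else pvHexChars.contains p.2)

-- ===== PRECONDITION & SPEC =====
def Spec_validate_hex_format (content : String) (out : Bool) : Prop := out = validate_hex_format_alt content
instance (content : String) (out : Bool) : Decidable (Spec_validate_hex_format content out) := by unfold Spec_validate_hex_format; infer_instance

-- ===== CLAIM (what is proved, stated in full; the proofs are below) =====
def Claim_equal_validate_hex_format : Prop := ∀ (content : String), Dom_validate_hex_format content → Spec_validate_hex_format content (validate_hex_format content)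

-- ===== LEMMAS AND PROOFS =====

-- structural version of split-on-'\n' (proof tool only)
def pvSplitNL (pre : List Char) : List Char → List (List Char)
  | [] => [pre]
  | c :: rest => if c = '\n' then pre :: pvSplitNL [] rest else pvSplitNL (pre ++ [c]) rest

theorem pvSplitNL_ne_nil (pre : List Char) (l : List Char) : pvSplitNL pre l ≠ [] := by
  induction l generalizing pre with
  | nil => simp [pvSplitNL]
  | cons c rest ih =>
    simp only [pvSplitNL]
    split
    · simp
    · exact ih _

theorem pvSplitOn_go_eq (l : List Char) : ∀ (fuel : Nat) (cur : List Char) (acc : List (List Char)),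
    l.length < fuel →
    PySem.Chars.splitOn.go ['\n'] fuel l cur acc = acc.reverse ++ pvSplitNL cur.reverse l := by
  induction l with
  | nil =>
    intro fuel cur acc h
    match fuel with
    | fuel + 1 =>
      simp [PySem.Chars.splitOn.go, pvSplitNL]
  | cons c rest ih =>
    intro fuel cur acc h
    match fuel with
    | fuel + 1 =>
      rw [PySem.Chars.splitOn.go]
      by_cases hc : c = '\n'
      · subst hc
        have hpre : List.isPrefixOf ['\n'] ('\n' :: rest) = true := by
          simp [List.isPrefixOf]
        simp only [hpre, if_pos, List.length_cons, List.length_nil, List.drop_succ_cons, List.drop_zero]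
        rw [ih fuel [] (cur.reverse :: acc) (by simpa using h)]
        simp [pvSplitNL]
      · have hpre : List.isPrefixOf ['\n'] (c :: rest) = false := by
          simp [List.isPrefixOf]; exact fun h' => absurd h'.symm hc
        simp only [hpre]
        rw [if_neg (by simp)]
        rw [ih fuel (c :: cur) acc (by simpa using h)]
        simp [pvSplitNL, hc]

theorem pvSplitOn_eq (cs : List Char) :
    PySem.Chars.splitOn cs ['\n'] = pvSplitNL [] cs := by
  rw [PySem.Chars.splitOn, pvSplitOn_go_eq cs (cs.length + 1) [] [] (by omega)]
  simp

theorem pvSplitNL_join (l : List Char) : ∀ (pre : List Char),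
    List.intercalate ['\n'] (pvSplitNL pre l) = pre ++ l := by
  induction l with
  | nil => intro pre; simp [pvSplitNL, List.intercalate]
  | cons c rest ih =>
    intro pre
    simp only [pvSplitNL]
    by_cases hc : c = '\n'
    · subst hc
      rw [if_pos rfl]
      obtain ⟨x, xs, hx⟩ := List.exists_cons_of_ne_nil (pvSplitNL_ne_nil [] rest)
      have hrest := ih []
      rw [hx] at hrest ⊢
      have h2 : List.intercalate ['\n'] (pre :: x :: xs) = pre ++ ['\n'] ++ List.intercalate ['\n'] (x :: xs) := by
        simp [List.intercalate]
      rw [h2, hrest]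
      simp
    · rw [if_neg hc, ih]
      simp

theorem pvSplitNL_no_nl (l : List Char) : ∀ (pre : List Char), '\n' ∉ pre →
    ∀ x ∈ pvSplitNL pre l, '\n' ∉ x := by
  induction l with
  | nil => intro pre h x hx; simp [pvSplitNL] at hx; subst hx; exact h
  | cons c rest ih =>
    intro pre h x hx
    simp only [pvSplitNL] at hx
    by_cases hc : c = '\n'
    · rw [if_pos hc] at hx
      rcases List.mem_cons.mp hx with rfl | hx'
      · exact h
      · exact ih [] (by simp) x hx'
    · rw [if_neg hc] at hx
      exact ih (pre ++ [c]) (by simp [h]; exact fun e => hc e.symm) x hx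

theorem pvSplitNL_head (l : List Char) : ∀ (pre : List Char),
    (pvSplitNL pre l).head (pvSplitNL_ne_nil pre l) = pre ++ l.takeWhile (fun c => c ≠ '\n') := by
  induction l with
  | nil => intro pre; simp [pvSplitNL]
  | cons c rest ih =>
    intro pre
    by_cases hc : c = '\n'
    · subst hc
      simp [pvSplitNL, List.takeWhile]
    · simp only [pvSplitNL, if_neg hc]
      rw [ih (pre ++ [c])]
      simp [List.takeWhile, hc]

theorem pvFindIdx_eq_takeWhile (cs : List Char) :
    List.findIdx (fun c => c == '\n') cs = (cs.takeWhile (fun c => c ≠ '\n')).length := by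
  induction cs with
  | nil => simp
  | cons c rest ih =>
    by_cases hc : c = '\n'
    · subst hc; simp [List.findIdx_cons, List.takeWhile]
    · rw [List.findIdx_cons, show (c == '\n') = false by simp [hc]]
      simp [List.takeWhile, hc, ih]

theorem pvSingletonPrefix (l : List Char) (a : Char) : [a] <+: l ↔ l.head? = some a := by
  constructor
  · rintro ⟨t, rfl⟩; rfl
  · intro h; cases l with
    | nil => simp at h
    | cons x xs => simp at h; subst h; exact ⟨xs, rfl⟩

-- the Int-valued w that B computes is the Nat findIdx of '\n'
theorem pvW_eq (cs : List Char) :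
    (if PySem.Chars.find cs ['\n'] == -1 then (cs.length : Int) else PySem.Chars.find cs ['\n'])
      = ((List.findIdx (fun c => c == '\n') cs : Nat) : Int) := by
  by_cases hmem : '\n' ∈ cs
  · have hnn : 0 ≤ PySem.Chars.find cs ['\n'] :=
      (PySem.Chars.find_nonneg_iff cs ['\n']).mpr ((List.singleton_infix_iff '\n' cs).mpr hmem)
    have hne : (PySem.Chars.find cs ['\n'] == -1) = false := by
      simp; omega
    rw [hne, if_neg (by simp)]
    obtain ⟨hpre, hmin⟩ := PySem.Chars.find_spec hnn
    set k := (PySem.Chars.find cs ['\n']).toNat with hk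
    have hlen : k < cs.length := by
      by_contra hge
      rw [List.drop_eq_nil_of_le (by omega)] at hpre
      simp at hpre
    have hget : cs[k] = '\n' := by
      have := (pvSingletonPrefix _ _).mp hpre
      rwa [List.head?_drop, List.getElem?_eq_getElem hlen, Option.some.injEq] at this
    have : List.findIdx (fun c => c == '\n') cs = k := by
      rw [List.findIdx_eq hlen]
      refine ⟨by simp [hget], fun j hj => ?_⟩
      have := hmin j hj
      simp only [pvSingletonPrefix] at this
      rw [List.head?_drop, List.getElem?_eq_getElem (by omega)] at this
      simp only [Option.some.injEq] at this
      simp [this]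
    rw [this]; omega
  · have h1 : PySem.Chars.find cs ['\n'] = -1 :=
      (PySem.Chars.find_eq_neg_one_iff cs ['\n']).mpr
        (by rw [List.singleton_infix_iff]; exact hmem)
    rw [h1, if_pos (by simp)]
    have : List.findIdx (fun c => c == '\n') cs = cs.length := by
      rw [List.findIdx_eq_length]
      intro x hx; simp; rintro rfl; exact hmem hx
    rw [this]

theorem pvALoop_iff (lines : List (List Char)) (f : Nat) :
    pvALoop lines f = true ↔ ∀ l ∈ lines, l.length = f ∧ ∀ c ∈ l, c ∈ pvHexChars := by
  induction lines with
  | nil => simp [pvALoop]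
  | cons line rest ih =>
    simp only [pvALoop]
    by_cases h : line.length = f
    · by_cases hall : ∀ c ∈ line, c ∈ pvHexChars
      · have ha : line.all (fun c => pvHexChars.contains c) = true := by
          simp [List.all_eq_true]; exact fun c hc => hall c hc
        simp [h, ih]
      · simp [h]
        intro hx; exact absurd hx hall
    · simp [h]

-- B's positional condition, Nat level
def pvPos (cs : List Char) (w : Nat) : Prop :=
  (cs.length + 1) % (w + 1) = 0 ∧
  ∀ i (h : i < cs.length), if i % (w + 1) = w then cs[i] = '\n' else cs[i] ∈ pvHexChars

theorem pvNlNotHex : '\n' ∉ pvHexChars := by decide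

-- base: a single newline-free line
theorem pvPos_single (l : List Char) (w : Nat) (hnl : '\n' ∉ l) :
    pvPos l w ↔ l.length = w ∧ ∀ c ∈ l, c ∈ pvHexChars := by
  constructor
  · rintro ⟨hmod, hall⟩
    have hle : l.length ≤ w := by
      by_contra hgt
      have h := hall w (by omega)
      rw [if_pos (Nat.mod_eq_of_lt (by omega))] at h
      exact hnl (h ▸ List.getElem_mem _)
    have heq : l.length = w := by
      have hd := Nat.le_of_dvd (by omega) (Nat.dvd_of_mod_eq_zero hmod)
      omega
    refine ⟨heq, fun c hc => ?_⟩
    obtain ⟨i, hi, rfl⟩ := List.mem_iff_getElem.mp hc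
    have h := hall i hi
    rwa [if_neg (by rw [Nat.mod_eq_of_lt (by omega)]; omega)] at h
  · rintro ⟨hlen, hhex⟩
    subst hlen
    refine ⟨by simp, fun i hi => ?_⟩
    rw [if_neg (by rw [Nat.mod_eq_of_lt (by omega)]; omega)]
    exact hhex _ (List.getElem_mem _)

-- shift lemma: peeling one newline-free line of length w off the front
theorem pvPos_shift (l cs' : List Char) (w : Nat) (hnl : '\n' ∉ l) :
    pvPos (l ++ '\n' :: cs') w ↔ (l.length = w ∧ (∀ c ∈ l, c ∈ pvHexChars)) ∧ pvPos cs' w := by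
  have hlen : (l ++ '\n' :: cs').length = l.length + cs'.length + 1 := by simp; omega
  have hgn : ∀ (h : l.length < (l ++ '\n' :: cs').length), (l ++ '\n' :: cs')[l.length] = '\n' := by
    intro h
    rw [List.getElem_append_right (le_refl _)]
    simp
  have hgl : ∀ i (hi : i < l.length), (l ++ '\n' :: cs')[i]'(by rw [hlen]; omega) = l[i] := by
    intro i hi; rw [List.getElem_append_left hi]
  have hgr : ∀ j (hj : j < cs'.length), (l ++ '\n' :: cs')[l.length + 1 + j]'(by rw [hlen]; omega) = cs'[j] := by
    intro j hj
    rw [List.getElem_append_right (by omega)]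
    simp only [List.getElem_cons]
    rw [dif_neg (by omega)]
    congr 1; omega
  constructor
  · rintro ⟨hmod, hall⟩
    have hw : l.length = w := by
      have hle : l.length ≤ w := by
        by_contra hgt
        have h := hall w (by omega)
        rw [if_pos (Nat.mod_eq_of_lt (by omega)), hgl w (by omega)] at h
        exact hnl (h ▸ List.getElem_mem _)
      have h := hall l.length (by omega)
      by_cases hm : l.length % (w + 1) = w
      · rw [Nat.mod_eq_of_lt (by omega)] at hm; omega
      · rw [if_neg hm, hgn _] at h
        exact absurd h pvNlNotHex
    refine ⟨⟨hw, fun c hc => ?_⟩, ?_, fun j hj => ?_⟩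
    · obtain ⟨i, hi, rfl⟩ := List.mem_iff_getElem.mp hc
      have h := hall i (by omega)
      rwa [if_neg (by rw [Nat.mod_eq_of_lt (by omega)]; omega), hgl i hi] at h
    · rw [hlen, hw] at hmod
      rw [show w + cs'.length + 1 + 1 = (w + 1) + (cs'.length + 1) by omega] at hmod
      rwa [Nat.add_mod_left] at hmod
    · have h := hall (l.length + 1 + j) (by omega)
      rw [hgr j hj, hw] at h
      rwa [show w + 1 + j = (w + 1) + j by omega, Nat.add_mod_left] at h
  · rintro ⟨⟨hw, hhex⟩, hmod', hall'⟩
    subst hw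
    refine ⟨?_, fun i hi => ?_⟩
    · rw [hlen, show l.length + cs'.length + 1 + 1 = (l.length + 1) + (cs'.length + 1) by omega,
        Nat.add_mod_left]
      exact hmod'
    · rcases lt_trichotomy i l.length with hlt | heq | hgt
      · rw [if_neg (by rw [Nat.mod_eq_of_lt (by omega)]; omega), hgl i hlt]
        exact hhex _ (List.getElem_mem _)
      · subst heq
        rw [if_pos (Nat.mod_eq_of_lt (by omega))]
        exact hgn _
      · have hj : i - l.length - 1 < cs'.length := by rw [hlen] at hi; omega
        have hieq : i = l.length + 1 + (i - l.length - 1) := by omega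
        have h := hall' (i - l.length - 1) hj
        have hmodeq : i % (l.length + 1) = (i - l.length - 1) % (l.length + 1) := by
          conv_lhs => rw [hieq]
          exact Nat.add_mod_left _ _
        rw [hmodeq]
        have hchar : (l ++ '\n' :: cs')[i] = cs'[i - l.length - 1] := by
          rw [List.getElem_append_right (by omega)]
          simp only [List.getElem_cons]
          rw [dif_neg (by omega)]
        rw [hchar]
        exact h

theorem pvPos_main (lines : List (List Char)) (hne : lines ≠ [])
    (hnl : ∀ l ∈ lines, '\n' ∉ l) (w : Nat) :
    pvPos (List.intercalate ['\n'] lines) w ↔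
      ∀ l ∈ lines, l.length = w ∧ ∀ c ∈ l, c ∈ pvHexChars := by
  induction lines with
  | nil => exact absurd rfl hne
  | cons l rest ih =>
    cases rest with
    | nil =>
      rw [show List.intercalate ['\n'] [l] = l by simp [List.intercalate]]
      rw [pvPos_single l w (hnl l (by simp))]
      simp
    | cons l' ls =>
      have hint : List.intercalate ['\n'] (l :: l' :: ls)
          = l ++ '\n' :: List.intercalate ['\n'] (l' :: ls) := by
        simp [List.intercalate]
      rw [hint, pvPos_shift _ _ _ (hnl l (by simp)),
        ih (by simp) (fun x hx => hnl x (List.mem_cons_of_mem _ hx))]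
      constructor
      · rintro ⟨⟨h1, h2⟩, h3⟩ x hx
        rcases List.mem_cons.mp hx with rfl | hx'
        · exact ⟨h1, h2⟩
        · exact h3 x hx'
      · intro h
        exact ⟨h l (by simp), fun x hx => h x (List.mem_cons_of_mem _ hx)⟩

-- ===== VERDICT (by name: the statement is the Claim_ definition above) =====
theorem validate_hex_format_spec : Claim_equal_validate_hex_format := by
  intro content _
  unfold Spec_validate_hex_format validate_hex_format validate_hex_format_alt
  simp only []
  set cs := PySem.Chars.strip content.toList with hcs
  set W := List.findIdx (fun c => c == '\n') cs with hW
  rw [pvSplitOn_eq, pvW_eq cs]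
  obtain ⟨l0, rest, hsplit⟩ := List.exists_cons_of_ne_nil (pvSplitNL_ne_nil [] cs)
  rw [hsplit]
  have hl0 : l0.length = W := by
    have hh := pvSplitNL_head cs []
    have h2 : (pvSplitNL [] cs).head (pvSplitNL_ne_nil [] cs) = l0 := by simp [hsplit]
    rw [h2, List.nil_append] at hh
    rw [hW, pvFindIdx_eq_takeWhile, hh]
  have hnl : ∀ l ∈ l0 :: rest, '\n' ∉ l := by
    rw [← hsplit]; exact pvSplitNL_no_nl cs [] (by simp)
  have hjoin : List.intercalate ['\n'] (l0 :: rest) = cs := by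
    rw [← hsplit, pvSplitNL_join]; simp
  have hA : pvALoop (l0 :: rest) l0.length = true ↔ pvPos cs W := by
    rw [pvALoop_iff, hl0, ← hjoin, pvPos_main _ (by simp) hnl W]
  have hmodcast : PySem.Int.mod ((cs.length : Int) + 1) ((W : Int) + 1)
      = (((cs.length + 1) % (W + 1) : Nat) : Int) := by
    have h := PySem.Int.mod_natCast (cs.length + 1) (W + 1)
    push_cast at h ⊢
    exact h
  rw [hmodcast]
  by_cases hz : (cs.length + 1) % (W + 1) = 0
  · rw [hz, if_neg (by simp)]
    have hB : (PySem.List.enumerate cs).all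
        (fun p => if PySem.Int.mod p.1 ((W : Int) + 1) == (W : Int) then p.2 == '\n'
                  else pvHexChars.contains p.2) = true
        ↔ (∀ i (h : i < cs.length), if i % (W + 1) = W then cs[i] = '\n' else cs[i] ∈ pvHexChars) := by
      rw [List.all_eq_true]
      constructor
      · intro hall i hi
        have h := hall ((0 : Int) + i, cs[i])
          ((PySem.List.mem_enumerate_iff _ _ _).mpr ⟨i, hi, rfl⟩)
        simp only [zero_add] at h
        have hm : PySem.Int.mod (i : Int) ((W : Int) + 1) = (((i % (W + 1) : Nat)) : Int) := by
          have h' := PySem.Int.mod_natCast i (W + 1)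
          push_cast at h' ⊢
          exact h'
        rw [hm] at h
        by_cases hiw : i % (W + 1) = W
        · rw [if_pos hiw]
          rw [if_pos (by simp [hiw])] at h
          simpa using h
        · rw [if_neg hiw]
          rw [if_neg (by simpa using fun e => hiw (by exact_mod_cast e))] at h
          simpa using h
      · intro h p hp
        obtain ⟨k, hk, rfl⟩ := (PySem.List.mem_enumerate_iff _ _ _).mp hp
        simp only [zero_add]
        have hm : PySem.Int.mod (k : Int) ((W : Int) + 1) = (((k % (W + 1) : Nat)) : Int) := by
          have h' := PySem.Int.mod_natCast k (W + 1)
          push_cast at h' ⊢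
          exact h'
        rw [hm]
        have hgoal := h k hk
        by_cases hiw : k % (W + 1) = W
        · rw [if_pos (by simp [hiw])]
          rw [if_pos hiw] at hgoal
          simpa using hgoal
        · rw [if_neg (by simpa using fun e => hiw (by exact_mod_cast e))]
          rw [if_neg hiw] at hgoal
          simpa using hgoal
    rw [Bool.eq_iff_iff, hA, hB]
    unfold pvPos
    constructor
    · rintro ⟨_, h2⟩; exact h2
    · intro h2; exact ⟨hz, h2⟩
  · rw [if_pos (fun e => hz (by exact_mod_cast e))]
    rw [Bool.eq_iff_iff, hA]
    simp only [Bool.false_eq_true, iff_false]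
    rintro ⟨h1, _⟩
    exact hz h1
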